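-- pv_equiv track=rewrite | github.com/hgrecco/pint | pint/facets/plain/registry.py | _dedup_candidates
-- ===== SOURCE A (Python) =====
-- from typing import (
--     TYPE_CHECKING,
--     Any,
--     Callable,
--     Dict,
--     FrozenSet,
--     Iterable,
--     Iterator,
--     List,
--     Optional,
--     Set,
--     Tuple,
--     Type,
--     TypeVar,
--     Union,
-- )
--
-- def _dedup_candidates(
--     candidates: Iterable[Tuple[str, str, str]]
-- ) -> Tuple[Tuple[str, str, str], ...]:
--     """Helper of parse_unit_name.
--
--     Given an iterable of unit triplets (prefix, name, suffix), remove those with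
--     different names but equal value, preferring those with a prefix.
--
--     e.g. ('kilo', 'gram', '') and ('', 'kilogram', '')
--     """
--     candidates = dict.fromkeys(candidates)  # ordered set
--     for cp, cu, cs in list(candidates):
--         assert isinstance(cp, str)
--         assert isinstance(cu, str)
--         if cs != "":
--             raise NotImplementedError("non-empty suffix")
--         if cp:
--             candidates.pop(("", cp + cu, ""), None)
--     return tuple(candidates)
-- ===== SOURCE B (Python) =====
-- def _dedup_candidates(candidates):
--     cands = list(candidates)
--     for cp, cu, cs in cands:
--         assert isinstance(cp, str)
--         assert isinstance(cu, str)
--         if cs != "":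
--             raise NotImplementedError("non-empty suffix")
--
--     def shadowed(c):
--         # c is redundant iff it is the unprefixed spelling of some prefixed candidate
--         return c[0] == "" and any(cp != "" and cp + cu == c[1] for cp, cu, _ in cands)
--
--     out = []
--     for c in cands:
--         if c not in out and not shadowed(c):
--             out.append(c)
--     return tuple(out)
-- ===== Notes on version B (the rewrite author's own statement) =====
-- stated objective: alternative
-- what changed: Drops dict.fromkeys and in-place pops entirely: B validates the raw list once, then runs a single accumulate loop that appends a candidate unless it is already in the output or a nested scan of the original list finds a prefixed candidate spelling it; dedup and removal are decided per element instead of by mutating an ordered dict.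
import Mathlib
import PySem

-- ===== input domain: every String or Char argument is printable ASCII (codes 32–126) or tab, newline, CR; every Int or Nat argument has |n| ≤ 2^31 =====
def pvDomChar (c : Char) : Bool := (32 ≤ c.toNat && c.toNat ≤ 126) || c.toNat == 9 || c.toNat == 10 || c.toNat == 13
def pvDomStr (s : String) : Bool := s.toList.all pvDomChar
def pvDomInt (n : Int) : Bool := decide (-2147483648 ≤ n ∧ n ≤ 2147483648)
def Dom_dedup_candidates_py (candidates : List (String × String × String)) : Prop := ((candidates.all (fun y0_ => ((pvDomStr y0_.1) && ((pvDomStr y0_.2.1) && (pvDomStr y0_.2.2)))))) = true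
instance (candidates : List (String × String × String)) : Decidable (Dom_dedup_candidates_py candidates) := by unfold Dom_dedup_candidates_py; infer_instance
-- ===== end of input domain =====

-- B drops the ordered dict and in-place pops: one validation pass over the raw
-- list, then one accumulate loop keeping a candidate unless already kept or
-- shadowed (a nested scan finds a prefixed candidate spelling it). Objective: alternative.

-- ===== PORT A =====
-- dict with unit values = ordered key list (keys distinct); dict.pop(k) on a
-- duplicate-free list = filter out k (exact here since dedup keys are distinct).
def dedup_candidates_py (candidates : List (String × String × String)) : List (String × String × String) :=
  ((PySem.List.dedup candidates).foldl (fun (acc : Option (List (String × String × String))) c =>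
      match acc with
      | none => none          -- NotImplementedError already raised
      | some s =>
        if c.2.2 != "" then none   -- raise NotImplementedError("non-empty suffix")
        else if c.1 != "" then some (s.filter (fun x => x != ("", c.1 ++ c.2.1, "")))
        else some s) (some (PySem.List.dedup candidates))).getD []

-- ===== PORT B =====
def pvShadowed (cands : List (String × String × String)) (c : String × String × String) : Bool :=
  c.1 == "" && cands.any (fun d => d.1 != "" && d.1 ++ d.2.1 == c.2.1)

def dedup_candidates_py_alt (candidates : List (String × String × String)) : List (String × String × String) :=
  if candidates.any (fun c => c.2.2 != "") then []   -- raise NotImplementedError("non-empty suffix")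
  else
    candidates.foldl (fun out c =>
      if out.contains c || pvShadowed candidates c then out else out ++ [c]) []

-- ===== PRECONDITION & SPEC =====
-- Pre_ excludes exactly the inputs containing a triplet with a non-empty suffix,
-- on which A raises NotImplementedError.
def Pre_dedup_candidates_py (candidates : List (String × String × String)) : Prop :=
  ∀ c ∈ candidates, c.2.2 = ""
instance (candidates : List (String × String × String)) : Decidable (Pre_dedup_candidates_py candidates) := by unfold Pre_dedup_candidates_py; infer_instance

def pvWitness_dedup_candidates_py : (List (String × String × String)) :=
  [("kilo", "gram", ""), ("", "kilogram", ""), ("", "meter", "")]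

def Spec_dedup_candidates_py (candidates : List (String × String × String)) (out : List (String × String × String)) : Prop := out = dedup_candidates_py_alt candidates
instance (candidates : List (String × String × String)) (out : List (String × String × String)) : Decidable (Spec_dedup_candidates_py candidates out) := by unfold Spec_dedup_candidates_py; infer_instance

-- ===== CLAIM (what is proved, stated in full; the proofs are below) =====
def Claim_equal_dedup_candidates_py : Prop := ∀ (candidates : List (String × String × String)), Dom_dedup_candidates_py candidates → Pre_dedup_candidates_py candidates → Spec_dedup_candidates_py candidates (dedup_candidates_py candidates)

-- ===== LEMMAS AND PROOFS =====

def pvRemKeys (d : List (String × String × String)) : List (String × String × String) :=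
  d.filterMap (fun c => if c.1 != "" then some (("", c.1 ++ c.2.1, "") : String × String × String) else none)

-- A's loop over the dedup snapshot computes a filter by the removal keys.
lemma pvLoopA (d s : List (String × String × String)) (h : ∀ c ∈ d, c.2.2 = "") :
    d.foldl (fun (acc : Option (List (String × String × String))) c =>
      match acc with
      | none => none
      | some s =>
        if c.2.2 != "" then none
        else if c.1 != "" then some (s.filter (fun x => x != ("", c.1 ++ c.2.1, "")))
        else some s) (some s)
    = some (s.filter (fun x => !(pvRemKeys d).contains x)) := by
  induction d generalizing s with
  | nil => simp [pvRemKeys]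
  | cons c d ih =>
    have hc : c.2.2 = "" := h c (List.mem_cons_self ..)
    have hd : ∀ x ∈ d, x.2.2 = "" := fun x hx => h x (List.mem_cons_of_mem _ hx)
    by_cases hp : c.1 = ""
    · simp only [List.foldl_cons, hc, hp, bne_self_eq_false, Bool.false_eq_true, if_false]
      rw [ih _ hd]
      simp [pvRemKeys, hp]
    · simp only [List.foldl_cons, hc]
      have hp' : (c.1 != "") = true := by simpa using hp
      simp only [hp', bne_self_eq_false, Bool.false_eq_true, if_false, if_true]
      rw [ih _ hd]
      congr 1
      rw [List.filter_filter]
      apply List.filter_congr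
      intro x _
      have hk : pvRemKeys (c :: d) = ("", c.1 ++ c.2.1, "") :: pvRemKeys d := by
        simp [pvRemKeys, hp]
      by_cases hx : x = ("", c.1 ++ c.2.1, "")
      · simp [hk, hx]
      · simp [hk, hx]

-- B's accumulate loop, started on a filtered seen-list, is the filtered dedup fold.
lemma pvLoopB {α : Type} [BEq α] [LawfulBEq α] (p : α → Bool) (l s : List α) :
    l.foldl (fun out c => if out.contains c || !(p c) then out else out ++ [c]) (s.filter p)
    = (l.foldl (fun t x => if t.contains x then t else t ++ [x]) s).filter p := by
  induction l generalizing s with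
  | nil => rfl
  | cons c l ih =>
    simp only [List.foldl_cons]
    by_cases hp : p c
    · by_cases hs : c ∈ s
      · have h1 : (s.filter p).contains c = true := by
          simp [List.mem_filter, hs, hp]
        have h2 : s.contains c = true := by simpa using hs
        simp only [h1, h2, Bool.true_or, if_true]
        exact ih s
      · have h1 : (s.filter p).contains c = false := by
          simp [List.mem_filter]; intro h; exact absurd h hs
        have h2 : s.contains c = false := by simpa using hs
        simp only [h1, h2, hp, Bool.not_true, Bool.or_false, Bool.false_eq_true, if_false]
        have : s.filter p ++ [c] = (s ++ [c]).filter p := by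
          simp [List.filter_append, hp]
        rw [this]
        exact ih (s ++ [c])
    · have hp' : (p c) = false := by simpa using hp
      simp only [hp', Bool.not_false, Bool.or_true, if_true]
      by_cases hs : c ∈ s
      · have h2 : s.contains c = true := by simpa using hs
        simp only [h2, if_true]
        exact ih s
      · have h2 : s.contains c = false := by simpa using hs
        simp only [h2, Bool.false_eq_true, if_false]
        have : s.filter p = (s ++ [c]).filter p := by
          simp [List.filter_append, hp']
        rw [this]
        exact ih (s ++ [c])

-- On suffix-free candidates, membership in A's removal keys = B's shadow test.
lemma pvKeysEqShadow (cands : List (String × String × String))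
    (hpre : ∀ c ∈ cands, c.2.2 = "") (x : String × String × String) (hx : x ∈ cands) :
    (pvRemKeys (PySem.List.dedup cands)).contains x = pvShadowed cands x := by
  obtain ⟨x1, x2, x3⟩ := x
  have hx3 : x3 = "" := hpre _ hx
  subst hx3
  rw [Bool.eq_iff_iff]
  simp only [List.contains_iff_mem, pvRemKeys, List.mem_filterMap, pvShadowed,
    Bool.and_eq_true, List.any_eq_true, beq_iff_eq, bne_iff_ne, PySem.List.mem_dedup]
  constructor
  · rintro ⟨c, hc, h⟩
    split_ifs at h with hcc
    · rw [Option.some.injEq, Prod.ext_iff, Prod.ext_iff] at h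
      obtain ⟨e1, e2, -⟩ := h
      exact ⟨e1.symm, c, hc, by simpa using hcc, e2⟩
  · rintro ⟨h1, c, hc, hc1, h2⟩
    refine ⟨c, hc, ?_⟩
    rw [if_pos hc1]
    simp [h1, h2]

theorem dedup_candidates_py_spec : Claim_equal_dedup_candidates_py := by
  intro cands _ hpre
  unfold Spec_dedup_candidates_py dedup_candidates_py dedup_candidates_py_alt
  have hd : ∀ c ∈ PySem.List.dedup cands, c.2.2 = "" := by
    intro c hc
    exact hpre c ((PySem.List.mem_dedup _ _).1 hc)
  rw [pvLoopA _ _ hd]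
  have hany : (cands.any (fun c => c.2.2 != "")) = false := by
    simp only [List.any_eq_false]
    intro c hc
    simp [hpre c hc]
  simp only [hany, Bool.false_eq_true, if_false, Option.getD_some]
  have hstep : (fun (out : List (String × String × String)) c =>
      if out.contains c || pvShadowed cands c then out else out ++ [c])
      = (fun out c => if out.contains c || !(!(pvShadowed cands c)) then out else out ++ [c]) := by
    funext out c; simp
  rw [hstep]
  have hB := pvLoopB (fun c => !(pvShadowed cands c)) cands ([] : List (String × String × String))
  simp only [List.filter_nil] at hB
  rw [hB]
  have hdedup : cands.foldl
      (fun (t : List (String × String × String)) x => if t.contains x then t else t ++ [x]) []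
      = PySem.List.dedup cands := by
    simp only [PySem.List.dedup, PySem.Set.ofList, PySem.Set.empty]
    rfl
  rw [hdedup]
  apply List.filter_congr
  intro x hx
  rw [pvKeysEqShadow cands hpre x ((PySem.List.mem_dedup _ _).1 hx)]
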